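-- pv_equiv track=rewrite | github.com/mmprotest/villani-code | benchmark_tasks/villani_hard_v1/localize_301_retrieval_pipeline_metadata_corruption/repo/src/app/rank.py | rank_chunks
-- ===== SOURCE A (Python) =====
-- def rank_chunks(chunks: list[dict], query: str) -> list[dict]:
--     terms = set(query.lower().split())
--     scored = []
--     for chunk in chunks:
--         score = sum(1 for term in terms if term in chunk['text'].lower())
--         scored.append((score, chunk))
--     scored.sort(key=lambda item: item[0], reverse=True)
--     return [chunk for score, chunk in scored if score >= 0]
-- ===== SOURCE B (Python) =====
-- def rank_chunks(chunks: list[dict], query: str) -> list[dict]: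
--     terms = set(query.lower().split())
--     if not terms:
--         return list(chunks)  # every score is 0, so the original order is already the answer
--     buckets = [[] for _ in range(len(terms) + 1)]
--     for chunk in chunks:
--         text = chunk['text'].lower()
--         score = 0
--         for term in terms:
--             if term in text:
--                 score += 1
--         buckets[score].append(chunk)
--     out = []
--     for bucket in reversed(buckets):
--         out.extend(bucket)
--     return out
-- ===== Notes on version B (the rewrite author's own statement) =====
-- stated objective: alternative
-- what changed: B replaces A's build-(score,chunk)-pairs-then-stable-sort with score buckets: each chunk is appended to buckets[score] in input order and the buckets are emitted from highest to lowest, plus an early return of the input order when the query has no terms; no sort is performed.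
import Mathlib
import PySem

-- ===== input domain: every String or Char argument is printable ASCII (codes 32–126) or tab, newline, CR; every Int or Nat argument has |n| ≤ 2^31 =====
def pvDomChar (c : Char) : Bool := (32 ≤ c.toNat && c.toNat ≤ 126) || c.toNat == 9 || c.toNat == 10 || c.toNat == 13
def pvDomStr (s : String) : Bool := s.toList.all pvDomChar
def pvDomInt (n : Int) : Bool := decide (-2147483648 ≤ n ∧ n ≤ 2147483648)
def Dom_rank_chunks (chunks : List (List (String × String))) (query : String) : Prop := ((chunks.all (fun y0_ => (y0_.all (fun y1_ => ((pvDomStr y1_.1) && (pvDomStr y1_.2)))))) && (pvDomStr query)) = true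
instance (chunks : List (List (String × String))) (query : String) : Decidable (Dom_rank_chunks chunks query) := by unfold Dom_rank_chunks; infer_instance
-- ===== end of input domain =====

-- B replaces A's sort of (score, chunk) pairs by score buckets appended in input order and
-- emitted from the highest bucket down (plus an early return when the query has no terms);
-- same return value, no sort.

-- ===== PORT A =====
def rank_chunks (chunks : List (List (String × String))) (query : String) : List (List (String × String)) :=
  let terms : PySem.Set String := PySem.Set.ofList (PySem.Str.split₀ (PySem.Str.lower query))
  let scored : List (Int × List (String × String)) :=
    chunks.foldl (fun acc chunk =>
      let score : Int := terms.foldl (fun s term =>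
        if PySem.Str.isIn term (PySem.Str.lower (PySem.Dict.getD ⟨chunk⟩ "text" "")) then s + 1 else s) 0
      acc ++ [(score, chunk)]) []
  let scoredSorted := PySem.List.sorted scored (fun item => item.1) true
  (scoredSorted.filter (fun it => decide (0 ≤ it.1))).map (fun it => it.2)

-- ===== PORT B =====
def rank_chunks_alt (chunks : List (List (String × String))) (query : String) : List (List (String × String)) :=
  let terms : PySem.Set String := PySem.Set.ofList (PySem.Str.split₀ (PySem.Str.lower query))
  if terms = [] then chunks
  else
    let buckets0 : List (List (List (String × String))) := (List.range (terms.length + 1)).map (fun _ => [])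
    let buckets := chunks.foldl (fun bs chunk =>
      let text := PySem.Str.lower (PySem.Dict.getD ⟨chunk⟩ "text" "")
      let score : Nat := terms.foldl (fun s term => if PySem.Str.isIn term text then s + 1 else s) 0
      bs.set score ((bs.getD score []) ++ [chunk])) buckets0
    buckets.reverse.foldl (fun acc b => acc ++ b) []

-- ===== PRECONDITION & SPEC =====
-- Pre_ excludes exactly the inputs where the Python A raises KeyError: some chunk lacks the
-- key "text" while the query has at least one term (with no terms the lookup inside A's
-- per-term generator is never evaluated, so A returns there and Pre_ admits those inputs).
def Pre_rank_chunks (chunks : List (List (String × String))) (query : String) : Prop :=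
  PySem.Str.split₀ (PySem.Str.lower query) ≠ [] →
    chunks.all (fun c => (PySem.Dict.get? (⟨c⟩ : PySem.Dict String String) "text").isSome) = true
instance (chunks : List (List (String × String))) (query : String) : Decidable (Pre_rank_chunks chunks query) := by unfold Pre_rank_chunks; infer_instance
def pvWitness_rank_chunks : (List (List (String × String))) × String :=
  ([[("text", "alpha beta")], [("text", "gamma")]], "beta gamma")

def Spec_rank_chunks (chunks : List (List (String × String))) (query : String) (out : List (List (String × String))) : Prop := out = rank_chunks_alt chunks query
instance (chunks : List (List (String × String))) (query : String) (out : List (List (String × String))) : Decidable (Spec_rank_chunks chunks query out) := by unfold Spec_rank_chunks; infer_instance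

-- ===== CLAIM (what is proved, stated in full; the proofs are below) =====
def Claim_equal_rank_chunks : Prop := ∀ (chunks : List (List (String × String))) (query : String), Dom_rank_chunks chunks query → Pre_rank_chunks chunks query → Spec_rank_chunks chunks query (rank_chunks chunks query)

-- ===== LEMMAS AND PROOFS =====

-- the per-chunk score, as a Nat (B's loop); A computes its Int cast
def pvScore (terms : List String) (chunk : List (String × String)) : Nat :=
  terms.countP (fun term => PySem.Str.isIn term (PySem.Str.lower (PySem.Dict.getD ⟨chunk⟩ "text" "")))

lemma pvScore_le (terms : List String) (c : List (String × String)) : pvScore terms c ≤ terms.length :=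
  List.countP_le_length

lemma foldl_nat_count (p : String → Bool) (l : List String) (a : Nat) :
    l.foldl (fun s t => if p t then s + 1 else s) a = a + l.countP p := by
  induction l generalizing a with
  | nil => simp
  | cons x xs ih =>
      by_cases h : p x
      · simp [h, ih]; omega
      · simp [h, ih]

-- descending tier concatenation
def pvTiers (ks : List Int) (p : List (Int × List (String × String))) : List (Int × List (String × String)) :=
  ks.flatMap (fun k => p.filter (fun it => it.1 == k))

lemma mem_pvTiers_key {ks : List Int} {p : List (Int × List (String × String))} {y : Int × List (String × String)}
    (h : y ∈ pvTiers ks p) : y.1 ∈ ks ∧ y ∈ p := by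
  unfold pvTiers at h
  rcases List.mem_flatMap.mp h with ⟨k, hk, hy⟩
  have := List.mem_filter.mp hy
  exact ⟨by simpa [beq_iff_eq] using (beq_iff_eq.mp this.2) ▸ hk, this.1⟩

lemma insertBy_append_left {α : Type} (before : α → α → Bool) (x : α) (ys zs : List α)
    (h : ∀ y ∈ ys, before x y = false) :
    PySem.List.insertBy before x (ys ++ zs) = ys ++ PySem.List.insertBy before x zs := by
  induction ys with
  | nil => simp
  | cons y ys ih =>
      have hy : before x y = false := h y (by simp)
      simp [PySem.List.insertBy, hy, ih (fun y hy => h y (by simp [hy]))]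

lemma pvTiers_cons (k : Int) (ks : List Int) (p : List (Int × List (String × String))) :
    pvTiers (k :: ks) p = p.filter (fun it => it.1 == k) ++ pvTiers ks p := by
  simp [pvTiers]

lemma pvTiers_append_not_mem (ks : List Int) (p : List (Int × List (String × String)))
    (x : Int × List (String × String)) (hx : x.1 ∉ ks) :
    pvTiers ks (p ++ [x]) = pvTiers ks p := by
  induction ks with
  | nil => rfl
  | cons k ks ih =>
      have hk : (x.1 == k) = false := by
        simp only [beq_eq_false_iff_ne]; intro h; exact hx (by simp [h])
      have hx' : x.1 ∉ ks := fun h => hx (by simp [h])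
      rw [pvTiers_cons, pvTiers_cons, ih hx', List.filter_append]
      simp [hk]

lemma insertBy_pvTiers (ks : List Int) (hks : ks.Pairwise (· > ·))
    (p : List (Int × List (String × String))) (x : Int × List (String × String)) (hx : x.1 ∈ ks) :
    PySem.List.insertBy (fun a b => decide (b.1 < a.1)) x (pvTiers ks p) = pvTiers ks (p ++ [x]) := by
  induction ks with
  | nil => simp at hx
  | cons k ks ih =>
      rw [List.pairwise_cons] at hks
      obtain ⟨hgt, htail⟩ := hks
      rw [pvTiers_cons, pvTiers_cons]
      by_cases hxk : x.1 = k
      · have hnotin : x.1 ∉ ks := by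
          intro h; exact absurd (hgt _ h) (by omega)
        rw [insertBy_append_left]
        · have hins : PySem.List.insertBy (fun a b => decide (b.1 < a.1)) x (pvTiers ks p)
              = x :: pvTiers ks p := by
            cases h : pvTiers ks p with
            | nil => simp [PySem.List.insertBy]
            | cons z zs =>
                have hz : z ∈ pvTiers ks p := by rw [h]; exact List.mem_cons_self
                have hzk := (mem_pvTiers_key hz).1
                have hlt : z.1 < x.1 := by have := hgt _ hzk; omega
                simp [PySem.List.insertBy, hlt]
          rw [hins, pvTiers_append_not_mem ks p x hnotin, List.filter_append]
          simp [hxk]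
        · intro y hy
          have := List.mem_filter.mp hy
          have hyk : y.1 = k := beq_iff_eq.mp this.2
          simp [hyk, hxk]
      · have hx' : x.1 ∈ ks := by
          rcases List.mem_cons.mp hx with h | h
          · exact absurd h hxk
          · exact h
        have hklt : x.1 < k := hgt _ hx'
        rw [insertBy_append_left]
        · rw [ih htail hx', List.filter_append]
          simp [hxk]
        · intro y hy
          have := List.mem_filter.mp hy
          have hyk : y.1 = k := beq_iff_eq.mp this.2
          simp [hyk]; omega

lemma foldl_insertBy_pvTiers (ks : List Int) (hks : ks.Pairwise (· > ·))
    (p : List (Int × List (String × String))) (hp : ∀ y ∈ p, y.1 ∈ ks) :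
    p.foldl (fun acc x => PySem.List.insertBy (fun a b => decide (b.1 < a.1)) x acc) [] = pvTiers ks p := by
  induction p using List.reverseRecOn with
  | nil => simp [pvTiers]
  | append_singleton p x ih =>
      rw [List.foldl_append, List.foldl_cons, List.foldl_nil,
        ih (fun y hy => hp y (by simp [hy])),
        insertBy_pvTiers ks hks p x (hp x (by simp))]

-- A's result, characterised as the descending tier concatenation over raw chunks
lemma ks_pairwise (n : Nat) :
    (((List.range (n + 1)).reverse).map (fun k : Nat => Int.ofNat k)).Pairwise (· > ·) := by
  apply List.Pairwise.map (S := (· > ·))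
  · intro a b h
    exact_mod_cast h
  · exact (List.pairwise_reverse).mpr (by simpa using List.pairwise_lt_range (n := n + 1))

-- the sorted/filter/map pipeline of A, characterised as descending tier concatenation
lemma sortedA_eq (terms : List String) (chunks : List (List (String × String))) :
    ((PySem.List.sorted (chunks.map (fun c => ((pvScore terms c : Int), c))) (fun item => item.1) true).filter
        (fun it => decide (0 ≤ it.1))).map (fun it => it.2)
    = ((List.range (terms.length + 1)).reverse).flatMap
        (fun k => chunks.filter (fun c => pvScore terms c == k)) := by
  set scored := chunks.map (fun c => ((pvScore terms c : Int), c)) with hscd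
  set ks : List Int := ((List.range (terms.length + 1)).reverse).map (fun k : Nat => Int.ofNat k) with hks
  have hmem : ∀ y ∈ scored, y.1 ∈ ks := by
    intro y hy
    rw [hscd] at hy
    rcases List.mem_map.mp hy with ⟨c, hc, rfl⟩
    rw [hks]
    refine List.mem_map.mpr ⟨pvScore terms c, ?_, rfl⟩
    rw [List.mem_reverse, List.mem_range]
    exact Nat.lt_succ_of_le (pvScore_le terms c)
  have hsorted : PySem.List.sorted scored (fun item => item.1) true = pvTiers ks scored := by
    rw [PySem.List.sorted_rev_eq_foldl_insertBy]
    exact foldl_insertBy_pvTiers ks (ks_pairwise terms.length) scored hmem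
  rw [hsorted]
  have hfilt : (pvTiers ks scored).filter (fun it => decide (0 ≤ it.1)) = pvTiers ks scored := by
    apply List.filter_eq_self.mpr
    intro y hy
    have := (mem_pvTiers_key hy).2
    rw [hscd] at this
    rcases List.mem_map.mp this with ⟨c, _, rfl⟩
    simp
  rw [hfilt]
  unfold pvTiers
  rw [hks, List.flatMap_map, List.map_flatMap]
  apply List.flatMap_congr
  intro k _
  rw [hscd, List.filter_map, List.map_map]
  have hc : ((fun it : Int × List (String × String) => it.1 == Int.ofNat k) ∘ fun c => ((pvScore terms c : Int), c))
      = fun c => pvScore terms c == k := by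
    funext c
    simp [Function.comp, Int.ofNat_eq_natCast]
  rw [hc]
  have hid : ((fun it : Int × List (String × String) => it.2) ∘ fun c => ((pvScore terms c : Int), c)) = id := by
    funext c; rfl
  rw [hid, List.map_id]

set_option maxHeartbeats 1600000 in
-- A's result, characterised as the descending tier concatenation over raw chunks
lemma rank_chunks_eq_tiers (chunks : List (List (String × String))) (query : String) :
    rank_chunks chunks query =
      ((List.range ((PySem.Set.ofList (PySem.Str.split₀ (PySem.Str.lower query))).length + 1)).reverse).flatMap
        (fun k => chunks.filter
          (fun c => pvScore (PySem.Set.ofList (PySem.Str.split₀ (PySem.Str.lower query))) c == k)) := by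
  unfold rank_chunks
  simp only []
  set terms := PySem.Set.ofList (PySem.Str.split₀ (PySem.Str.lower query)) with hterms
  have hscored : chunks.foldl (fun acc chunk =>
      acc ++ [(terms.foldl (fun s term =>
        if PySem.Str.isIn term (PySem.Str.lower (PySem.Dict.getD ⟨chunk⟩ "text" "")) then s + 1 else s) (0 : Int), chunk)]) []
      = chunks.map (fun c => ((pvScore terms c : Int), c)) := by
    rw [PySem.List.foldl_congr_mem _ _
      (fun acc c => acc ++ [((pvScore terms c : Int), c)]) []
      (by
        intro acc c _
        congr 1
        rw [PySem.List.foldl_if_add_one]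
        simp [pvScore])]
    simpa using PySem.List.foldl_append_singleton_eq_map
      (fun c => ((pvScore terms c : Int), c)) chunks []
  rw [hscored]
  exact sortedA_eq terms chunks

set_option maxHeartbeats 1600000 in
lemma buckets_eq (terms : List String) (chunks : List (List (String × String))) :
    chunks.foldl (fun bs chunk =>
        bs.set (terms.foldl (fun s term =>
            if PySem.Str.isIn term (PySem.Str.lower (PySem.Dict.getD ⟨chunk⟩ "text" "")) then s + 1 else s) 0)
          ((bs.getD (terms.foldl (fun s term =>
            if PySem.Str.isIn term (PySem.Str.lower (PySem.Dict.getD ⟨chunk⟩ "text" "")) then s + 1 else s) 0) []) ++ [chunk]))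
      ((List.range (terms.length + 1)).map (fun _ => []))
    = (List.range (terms.length + 1)).map (fun k => chunks.filter (fun c => pvScore terms c == k)) := by
  induction chunks using List.reverseRecOn with
  | nil => simp
  | append_singleton p c ih =>
      rw [List.foldl_append, List.foldl_cons, List.foldl_nil, ih]
      set s := terms.foldl (fun s term =>
        if PySem.Str.isIn term (PySem.Str.lower (PySem.Dict.getD ⟨c⟩ "text" "")) then s + 1 else s) 0 with hs
      have hseq : s = pvScore terms c := by
        rw [hs, foldl_nat_count]; simp [pvScore]
      have hslt : s < terms.length + 1 := by
        rw [hseq]; exact Nat.lt_succ_of_le (pvScore_le terms c)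
      apply List.ext_getElem
      · simp
      · intro j h1 h2
        simp only [List.length_set, List.length_map, List.length_range] at h1 h2
        rw [List.getElem_set]
        have hget : ∀ (g : Nat → List (List (String × String))) (i : Nat) (hi : i < terms.length + 1),
            ((List.range (terms.length + 1)).map g)[i]'(by simpa using hi) = g i := by
          intro g i hi
          simp
        by_cases hjs : s = j
        · subst hjs
          rw [if_pos rfl, hget _ _ hslt]
          rw [List.getD_eq_getElem _ _ (by simpa using hslt), hget _ _ hslt,
            List.filter_append]
          simp [hseq]
        · rw [if_neg hjs, hget _ _ h2, hget _ _ h2, List.filter_append]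
          have : (pvScore terms c == j) = false := by
            simp only [beq_eq_false_iff_ne]
            intro h; exact hjs (by rw [hseq, h])
          simp [this]

set_option maxHeartbeats 1600000 in
theorem rank_chunks_spec : Claim_equal_rank_chunks := by
  unfold Claim_equal_rank_chunks Spec_rank_chunks
  intro chunks query _ _
  rw [rank_chunks_eq_tiers]
  unfold rank_chunks_alt
  simp only []
  set terms := PySem.Set.ofList (PySem.Str.split₀ (PySem.Str.lower query)) with hterms
  by_cases hempty : terms = []
  · rw [if_pos hempty, hempty]
    simp [pvScore]
  · rw [if_neg hempty]
    rw [buckets_eq terms chunks]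
    rw [← List.map_reverse, PySem.List.foldl_append_eq_flatMap, List.flatMap_map]
    simp
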